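-- pv_equiv track=rewrite | github.com/dotlessone/MGS3-PS2-Textures | Old Scripts/build map.py | filter_candidates_by_unique_pairs
-- ===== SOURCE A (Python) =====
-- from typing import Dict, List, Optional, Set, Tuple
--
-- def filter_candidates_by_unique_pairs(
--     folder_num: int,
--     candidates: Set[str],
--     expected_pairs_by_name: Dict[str, Set[Tuple[str, str]]],
--     pair_index: Dict[Tuple[str, str], Set[int]],
-- ) -> Set[str]:
--     """
--     If candidates conflict, try to eliminate names that are missing their unique tri/tex pairs.
--
--     For each candidate name, compute:
--       unique_pairs = expected_pairs[name] - union(expected_pairs[other candidates])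
--
--     If unique_pairs is non-empty, require ALL those pairs exist in this folder.
--     Names without any unique pairs are kept.
--     """
--     if len(candidates) <= 1:
--         return set(candidates)
--
--     expected: Dict[str, Set[Tuple[str, str]]] = {}
--     for name in candidates:
--         expected[name] = set(expected_pairs_by_name.get(name, set()))
--
--     out: Set[str] = set()
--
--     for name in candidates:
--         other_union: Set[Tuple[str, str]] = set()
--         for other in candidates:
--             if other == name:
--                 continue
--             other_union |= expected.get(other, set())
--
--         unique_pairs = expected.get(name, set()) - other_union
--         if not unique_pairs:
--             out.add(name)
--             continue
--
--         ok = True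
--         for key in unique_pairs:
--             if folder_num not in pair_index.get(key, set()):
--                 ok = False
--                 break
--
--         if ok:
--             out.add(name)
--
--     return out
-- ===== SOURCE B (Python) =====
-- def filter_candidates_by_unique_pairs(folder_num, candidates, expected_pairs_by_name, pair_index):
--     """Staged passes: dedup each name's expected pairs once into a list,
--     count every pair globally (a pair is unique to its name iff its count
--     is 1), then select names with one comprehension -- the per-name union
--     over all other candidates disappears."""
--     if len(candidates) <= 1:
--         return set(candidates)
--
--     pairs_of = [(name, set(expected_pairs_by_name.get(name, set())))
--                 for name in candidates]
--
--     counts = {}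
--     for p in (p for _, ps in pairs_of for p in ps):
--         counts[p] = counts.get(p, 0) + 1
--
--     return {name for name, ps in pairs_of
--             if all(folder_num in pair_index.get(p, set())
--                    for p in ps if counts[p] == 1)}
-- ===== Notes on version B (the rewrite author's own statement) =====
-- stated objective: faster
-- what changed: Instead of A's per-candidate union over all other candidates' pair sets, B builds a (name, pairs) table and one global pair->count map in staged passes and selects names by a single comprehension (a pair is unique iff its count is 1).
import Mathlib
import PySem

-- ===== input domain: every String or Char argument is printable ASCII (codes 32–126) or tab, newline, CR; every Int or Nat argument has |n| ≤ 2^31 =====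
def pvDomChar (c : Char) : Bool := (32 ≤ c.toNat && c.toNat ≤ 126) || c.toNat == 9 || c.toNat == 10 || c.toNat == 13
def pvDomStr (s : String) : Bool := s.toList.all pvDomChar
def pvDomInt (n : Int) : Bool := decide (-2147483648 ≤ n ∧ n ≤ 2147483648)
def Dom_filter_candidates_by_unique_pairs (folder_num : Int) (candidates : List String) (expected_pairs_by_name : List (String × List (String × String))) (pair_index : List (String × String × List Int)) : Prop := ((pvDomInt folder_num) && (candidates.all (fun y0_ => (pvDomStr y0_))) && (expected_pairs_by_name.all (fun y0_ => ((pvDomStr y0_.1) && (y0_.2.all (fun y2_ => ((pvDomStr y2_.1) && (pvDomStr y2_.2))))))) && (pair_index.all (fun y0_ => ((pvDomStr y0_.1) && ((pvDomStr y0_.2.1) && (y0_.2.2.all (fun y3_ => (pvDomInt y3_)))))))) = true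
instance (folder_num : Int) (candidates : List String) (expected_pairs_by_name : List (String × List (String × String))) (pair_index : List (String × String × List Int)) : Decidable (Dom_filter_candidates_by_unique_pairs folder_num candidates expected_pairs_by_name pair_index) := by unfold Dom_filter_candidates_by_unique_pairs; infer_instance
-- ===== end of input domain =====

-- B replaces A's quadratic per-name union over the other candidates with staged passes:
-- a (name, deduped pairs) table, one global pair->count map (unique pair iff count == 1),
-- and a filter over the table; equality of the returned sets is proved below.

-- ===== PORT A =====
def filter_candidates_by_unique_pairs (folder_num : Int) (candidates : List String) (expected_pairs_by_name : List (String × List (String × String))) (pair_index : List (String × String × List Int)) : List String :=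
  if candidates.length ≤ 1 then PySem.Set.ofList candidates
  else
    let epbn : PySem.Dict String (List (String × String)) := PySem.Dict.mk expected_pairs_by_name
    let pidx : PySem.Dict (String × String) (List Int) :=
      PySem.Dict.mk (pair_index.map (fun e => ((e.1, e.2.1), e.2.2)))
    let expected : PySem.Dict String (PySem.Set (String × String)) :=
      candidates.foldl (fun d name => d.insert name (PySem.Set.ofList (epbn.getD name []))) PySem.Dict.empty
    candidates.foldl (fun out name =>
      let other_union : PySem.Set (String × String) :=
        candidates.foldl (fun u other => if other == name then u else PySem.Set.union u (expected.getD other [])) PySem.Set.empty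
      let unique_pairs := PySem.Set.diff (expected.getD name []) other_union
      if unique_pairs.isEmpty then PySem.Set.add out name
      else
        let ok := unique_pairs.foldl (fun ok key => if !((pidx.getD key []).contains folder_num) then false else ok) true
        if ok then PySem.Set.add out name else out) PySem.Set.empty

-- ===== PORT B =====
def filter_candidates_by_unique_pairs_alt (folder_num : Int) (candidates : List String) (expected_pairs_by_name : List (String × List (String × String))) (pair_index : List (String × String × List Int)) : List String :=
  if candidates.length ≤ 1 then PySem.Set.ofList candidates
  else
    let epbn : PySem.Dict String (List (String × String)) := PySem.Dict.mk expected_pairs_by_name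
    let pairs_of : List (String × PySem.Set (String × String)) :=
      candidates.map (fun name => (name, PySem.Set.ofList (epbn.getD name [])))
    let counts : PySem.Dict (String × String) Int :=
      (pairs_of.flatMap (fun e => e.2)).foldl (fun d p => d.insert p (d.getD p 0 + 1)) PySem.Dict.empty
    let pidx : PySem.Dict (String × String) (List Int) :=
      PySem.Dict.mk (pair_index.map (fun e => ((e.1, e.2.1), e.2.2)))
    PySem.Set.ofList
      ((pairs_of.filter (fun e =>
          (e.2.filter (fun p => counts.getD p 0 == 1)).all
            (fun p => (pidx.getD p []).contains folder_num))).map (fun e => e.1))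

-- ===== PRECONDITION & SPEC =====
-- Pre_ excludes candidate lists with duplicate elements: 'candidates' is a Python set, so a
-- list with duplicates represents no Python input at all (the list holds the set's distinct elements).
def Pre_filter_candidates_by_unique_pairs (folder_num : Int) (candidates : List String) (expected_pairs_by_name : List (String × List (String × String))) (pair_index : List (String × String × List Int)) : Prop :=
  candidates.Nodup
instance (folder_num : Int) (candidates : List String) (expected_pairs_by_name : List (String × List (String × String))) (pair_index : List (String × String × List Int)) : Decidable (Pre_filter_candidates_by_unique_pairs folder_num candidates expected_pairs_by_name pair_index) := by unfold Pre_filter_candidates_by_unique_pairs; infer_instance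

def pvWitness_filter_candidates_by_unique_pairs : Int × List String × (List (String × List (String × String))) × (List (String × String × List Int)) :=
  (7, ["a", "b"], [("a", [("t1", "x1")]), ("b", [("t2", "x2")])], [("t1", "x1", [7])])

def Spec_filter_candidates_by_unique_pairs (folder_num : Int) (candidates : List String) (expected_pairs_by_name : List (String × List (String × String))) (pair_index : List (String × String × List Int)) (out : List String) : Prop := out = filter_candidates_by_unique_pairs_alt folder_num candidates expected_pairs_by_name pair_index
instance (folder_num : Int) (candidates : List String) (expected_pairs_by_name : List (String × List (String × String))) (pair_index : List (String × String × List Int)) (out : List String) : Decidable (Spec_filter_candidates_by_unique_pairs folder_num candidates expected_pairs_by_name pair_index out) := by unfold Spec_filter_candidates_by_unique_pairs; infer_instance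

-- ===== CLAIM (what is proved, stated in full; the proofs are below) =====
def Claim_equal_filter_candidates_by_unique_pairs : Prop := ∀ (folder_num : Int) (candidates : List String) (expected_pairs_by_name : List (String × List (String × String))) (pair_index : List (String × String × List Int)), Dom_filter_candidates_by_unique_pairs folder_num candidates expected_pairs_by_name pair_index → Pre_filter_candidates_by_unique_pairs folder_num candidates expected_pairs_by_name pair_index → Spec_filter_candidates_by_unique_pairs folder_num candidates expected_pairs_by_name pair_index (filter_candidates_by_unique_pairs folder_num candidates expected_pairs_by_name pair_index)

-- ===== LEMMAS AND PROOFS =====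

-- a dict built by inserting a key-determined value for every element of l
theorem pv_getD_foldl_insert_fun {κ ν : Type} [DecidableEq κ] [BEq κ] [LawfulBEq κ]
    (l : List κ) (g : κ → ν) (d : PySem.Dict κ ν) (k : κ) (dflt : ν) :
    (l.foldl (fun d n => d.insert n (g n)) d).getD k dflt
      = if k ∈ l then g k else d.getD k dflt := by
  induction l generalizing d with
  | nil => simp
  | cons x t ih =>
      simp only [List.foldl_cons, ih, PySem.Dict.getD_insert, List.mem_cons]
      by_cases hkt : k ∈ t <;> by_cases hkx : k = x <;> simp [hkt, hkx]

-- membership in A's running union over the other candidates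
theorem pv_mem_foldl_union_if {α β : Type} [BEq α] [LawfulBEq α] [BEq β] [LawfulBEq β]
    (l : List α) (name : α) (g : α → List β) (s : PySem.Set β) (p : β) :
    p ∈ l.foldl (fun u o => if o == name then u else PySem.Set.union u (g o)) s
      ↔ p ∈ s ∨ ∃ o ∈ l, o ≠ name ∧ p ∈ g o := by
  induction l generalizing s with
  | nil => simp
  | cons x t ih =>
      simp only [List.foldl_cons]
      by_cases hx : x = name
      · rw [if_pos (by simp [hx]), ih]
        constructor
        · rintro (h | ⟨o, ho, hne, hp⟩)
          · exact Or.inl h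
          · exact Or.inr ⟨o, List.mem_cons_of_mem _ ho, hne, hp⟩
        · rintro (h | ⟨o, ho, hne, hp⟩)
          · exact Or.inl h
          · rcases List.mem_cons.mp ho with rfl | ho'
            · exact absurd hx hne
            · exact Or.inr ⟨o, ho', hne, hp⟩
      · rw [if_neg (by simp [hx]), ih]
        rw [PySem.Set.mem_union]
        constructor
        · rintro ((h | h) | ⟨o, ho, hne, hp⟩)
          · exact Or.inl h
          · exact Or.inr ⟨x, List.mem_cons_self, hx, h⟩
          · exact Or.inr ⟨o, List.mem_cons_of_mem _ ho, hne, hp⟩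
        · rintro (h | ⟨o, ho, hne, hp⟩)
          · exact Or.inl (Or.inl h)
          · rcases List.mem_cons.mp ho with rfl | ho'
            · exact Or.inl (Or.inr hp)
            · exact Or.inr ⟨o, ho', hne, hp⟩

-- A's accumulation loop 'if c then add else keep' is Set.ofList of the filtered list
theorem pv_foldl_add_if_eq_ofList_filter {α : Type} [BEq α] [LawfulBEq α]
    (l : List α) (p : α → Bool) :
    l.foldl (fun out x => if p x then PySem.Set.add out x else out) PySem.Set.empty
      = PySem.Set.ofList (l.filter p) := by
  rw [PySem.Set.ofList_eq_foldl]
  have h : ∀ s : PySem.Set α,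
      l.foldl (fun out x => if p x then PySem.Set.add out x else out) s
        = (l.filter p).foldl PySem.Set.add s := by
    induction l with
    | nil => intro s; rfl
    | cons x t ih =>
        intro s
        by_cases hx : p x = true <;> simp [hx, ih]
  exact h _

-- for p expected by name: global count 1 ↔ no other candidate expects p
theorem pv_count_one_iff {κ : Type} [BEq κ] [LawfulBEq κ] [DecidableEq κ]
    (l : List String) (E : String → List κ) (hE : ∀ o, (E o).Nodup)
    (hnd : l.Nodup) (name : String) (hname : name ∈ l) (p : κ) (hp : p ∈ E name) :
    (l.flatMap E).count p = 1 ↔ ¬ ∃ o ∈ l, o ≠ name ∧ p ∈ E o := by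
  have hperm : l.Perm (name :: l.erase name) := List.perm_cons_erase hname
  have hcount : (l.flatMap E).count p = (E name).count p + ((l.erase name).flatMap E).count p := by
    rw [(hperm.flatMap_right E).count_eq]
    simp [List.flatMap_cons, List.count_append]
  have h1 : (E name).count p = 1 := List.count_eq_one_of_mem (hE name) hp
  rw [hcount, h1]
  have hz : ((l.erase name).flatMap E).count p = 0 ↔ ¬ ∃ o ∈ l.erase name, p ∈ E o := by
    simp [List.count_eq_zero, List.mem_flatMap]
  constructor
  · intro h hex
    rcases hex with ⟨o, ho, hne, hpo⟩
    have : o ∈ l.erase name := (List.Nodup.mem_erase_iff hnd).mpr ⟨hne, ho⟩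
    have : ((l.erase name).flatMap E).count p = 0 := by omega
    exact (hz.mp this) ⟨o, ‹o ∈ l.erase name›, hpo⟩
  · intro h
    have : ((l.erase name).flatMap E).count p = 0 := by
      rw [hz]
      rintro ⟨o, ho, hpo⟩
      have ho' := (List.Nodup.mem_erase_iff hnd).mp ho
      exact h ⟨o, ho'.2, ho'.1, hpo⟩
    omega

theorem filter_candidates_by_unique_pairs_spec : Claim_equal_filter_candidates_by_unique_pairs := by
  intro folder_num candidates expected_pairs_by_name pair_index _hdom hnd
  unfold Spec_filter_candidates_by_unique_pairs
  unfold filter_candidates_by_unique_pairs filter_candidates_by_unique_pairs_alt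
  by_cases hlen : candidates.length ≤ 1
  · simp [hlen]
  · simp only [hlen, if_false]
    -- the 'expected' dict agrees with each candidate's deduped pair list
    have hexp : ∀ n, n ∈ candidates →
        (candidates.foldl (fun d nm => d.insert nm (PySem.Set.ofList ((PySem.Dict.mk expected_pairs_by_name).getD nm []))) PySem.Dict.empty).getD n []
          = PySem.Set.ofList ((PySem.Dict.mk expected_pairs_by_name).getD n []) := by
      intro n hn
      rw [pv_getD_foldl_insert_fun, if_pos hn]
    -- B's counts dict is the count of the flattened pair list
    have hcounts : ∀ p : String × String,
        (((candidates.map (fun name => (name, PySem.Set.ofList ((PySem.Dict.mk expected_pairs_by_name).getD name [])))).flatMap (fun e => e.2)).foldl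
            (fun d p => d.insert p (d.getD p 0 + 1)) PySem.Dict.empty).getD p 0
          = ((candidates.flatMap (fun n => PySem.Set.ofList ((PySem.Dict.mk expected_pairs_by_name).getD n []))).count p : Int) := by
      intro p
      rw [PySem.Dict.getD_foldl_insert_add_one]
      simp [List.flatMap_map]
    -- A's loop body, per candidate, is 'if <B's per-name test with true counts> then add else keep'
    have hAbody : ∀ name ∈ candidates, ∀ out : PySem.Set String,
        (let other_union : PySem.Set (String × String) :=
          candidates.foldl (fun u other => if other == name then u
            else PySem.Set.union u ((candidates.foldl (fun d nm => d.insert nm (PySem.Set.ofList ((PySem.Dict.mk expected_pairs_by_name).getD nm []))) PySem.Dict.empty).getD other [])) PySem.Set.empty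
        let unique_pairs := PySem.Set.diff ((candidates.foldl (fun d nm => d.insert nm (PySem.Set.ofList ((PySem.Dict.mk expected_pairs_by_name).getD nm []))) PySem.Dict.empty).getD name []) other_union
        if unique_pairs.isEmpty then PySem.Set.add out name
        else
          let ok := unique_pairs.foldl (fun ok key => if !(((PySem.Dict.mk (pair_index.map (fun e => ((e.1, e.2.1), e.2.2)))).getD key []).contains folder_num) then false else ok) true
          if ok then PySem.Set.add out name else out)
        = if ((PySem.Set.ofList ((PySem.Dict.mk expected_pairs_by_name).getD name [])).filter
                (fun p => ((candidates.flatMap (fun n => PySem.Set.ofList ((PySem.Dict.mk expected_pairs_by_name).getD n []))).count p : Int) == 1)).all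
              (fun p => (((PySem.Dict.mk (pair_index.map (fun e => ((e.1, e.2.1), e.2.2)))).getD p []).contains folder_num))
          then PySem.Set.add out name else out := by
      intro name hmem out
      simp only
      rw [hexp name hmem]
      have hok : ∀ D : List (String × String),
          List.foldl (fun ok key => if (!(((PySem.Dict.mk (pair_index.map (fun e => ((e.1, e.2.1), e.2.2)))).getD key []).contains folder_num)) = true then false else ok) true D
            = D.all (fun key => ((PySem.Dict.mk (pair_index.map (fun e => ((e.1, e.2.1), e.2.2)))).getD key []).contains folder_num) := by
        intro D
        rw [PySem.List.foldl_if_false_eq]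
        simp [List.all_eq_not_any_not]
      rw [hok]
      have hsplit : ∀ (c1 c2 : Bool) (a b : PySem.Set String),
          (if c1 = true then a else if c2 = true then a else b) = if (c1 || c2) = true then a else b := by
        intro c1 c2 a b; cases c1 <;> cases c2 <;> simp
      rw [hsplit]
      have hempty : ∀ (D : List (String × String)) (M : String × String → Bool),
          (D.isEmpty || D.all M) = D.all M := by
        intro D M; cases D <;> simp
      rw [hempty]
      refine congrArg (fun c : Bool => if c = true then PySem.Set.add out name else out) ?_
      rw [Bool.eq_iff_iff]
      have hU : ∀ k : String × String,
          k ∈ List.foldl (fun u other => if other == name then u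
                else PySem.Set.union u ((candidates.foldl (fun d nm => d.insert nm (PySem.Set.ofList ((PySem.Dict.mk expected_pairs_by_name).getD nm []))) PySem.Dict.empty).getD other []))
              PySem.Set.empty candidates
            ↔ ∃ o ∈ candidates, o ≠ name ∧ k ∈ PySem.Set.ofList ((PySem.Dict.mk expected_pairs_by_name).getD o []) := by
        intro k
        rw [pv_mem_foldl_union_if]
        constructor
        · rintro (h | ⟨o, ho, hne, hk⟩)
          · simp at h
          · exact ⟨o, ho, hne, by rwa [hexp o ho] at hk⟩
        · rintro ⟨o, ho, hne, hk⟩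
          exact Or.inr ⟨o, ho, hne, by rwa [hexp o ho]⟩
      have hone : ∀ p : String × String, p ∈ PySem.Set.ofList ((PySem.Dict.mk expected_pairs_by_name).getD name []) →
          ((candidates.flatMap (fun n => PySem.Set.ofList ((PySem.Dict.mk expected_pairs_by_name).getD n []))).count p = 1
            ↔ ¬ ∃ o ∈ candidates, o ≠ name ∧ p ∈ PySem.Set.ofList ((PySem.Dict.mk expected_pairs_by_name).getD o [])) :=
        fun p hp => pv_count_one_iff candidates (fun n => PySem.Set.ofList ((PySem.Dict.mk expected_pairs_by_name).getD n []))
          (fun o => PySem.Set.nodup_ofList _) hnd name hmem p hp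
      simp only [List.all_eq_true, List.mem_filter]
      constructor
      · intro h p hp
        have hc' : (candidates.flatMap (fun n => PySem.Set.ofList ((PySem.Dict.mk expected_pairs_by_name).getD n []))).count p = 1 := by
          simpa using hp.2
        exact h p ((PySem.Set.mem_diff _ _ _).mpr ⟨hp.1, fun hkU => ((hone p hp.1).mp hc') ((hU p).mp hkU)⟩)
      · intro h k hk
        have hk' := (PySem.Set.mem_diff _ _ _).mp hk
        have hcnt : (candidates.flatMap (fun n => PySem.Set.ofList ((PySem.Dict.mk expected_pairs_by_name).getD n []))).count k = 1 :=
          (hone k hk'.1).mpr (fun he => hk'.2 ((hU k).mpr he))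
        exact h k ⟨hk'.1, by simp [hcnt]⟩
    -- A's loop = ofList of the filtered candidate list
    refine Eq.trans (PySem.List.foldl_congr_mem candidates _
        (fun out name =>
          if ((PySem.Set.ofList ((PySem.Dict.mk expected_pairs_by_name).getD name [])).filter
                (fun p => ((candidates.flatMap (fun n => PySem.Set.ofList ((PySem.Dict.mk expected_pairs_by_name).getD n []))).count p : Int) == 1)).all
              (fun p => (((PySem.Dict.mk (pair_index.map (fun e => ((e.1, e.2.1), e.2.2)))).getD p []).contains folder_num))
          then PySem.Set.add out name else out)
        PySem.Set.empty (fun acc x hx => hAbody x hx acc)) ?_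
    rw [pv_foldl_add_if_eq_ofList_filter]
    -- B's filtered table, projected to names, is the same filter over candidates
    rw [List.filter_map, List.map_map]
    refine congrArg PySem.Set.ofList ?_
    rw [show ((fun (e : String × PySem.Set (String × String)) => e.1) ∘
          (fun name => (name, PySem.Set.ofList ((PySem.Dict.mk expected_pairs_by_name).getD name [])))) = id from rfl,
        List.map_id]
    refine List.filter_congr ?_
    intro n _
    simp only [Function.comp_apply]
    refine congrArg (fun D : List (String × String) =>
      D.all (fun p => (((PySem.Dict.mk (pair_index.map (fun e => ((e.1, e.2.1), e.2.2)))).getD p []).contains folder_num))) ?_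
    refine List.filter_congr ?_
    intro p _
    rw [hcounts p]
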